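-- pv_equiv track=rewrite | github.com/GuoXueyi/ThermalizationAndIrreversibilityOfAnIsolatedQuantumSystem | HubbardModelModules.py | generate_binary_strings_from_input
-- ===== SOURCE A (Python) =====
-- import itertools
-- import itertools
--
-- def generate_binary_strings_from_input(str1, str2):
--     """
--     根据两个输入的二进制字符串，生成所有可能的拼接结果，并按字典顺序排序。
--
--     参数：
--     - str1: 第一个二进制字符串。
--     - str2: 第二个二进制字符串。
--
--     返回：
--     - 拼接结果的按字典顺序排序的列表。
--     """
--     # 计算第一个字符串的长度 L1 和其中 1 的数量 n1
--     L1 = len(str1)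
--     n1 = str1.count('1')
--
--     # 计算第二个字符串的长度 L2 和其中 1 的数量 n2
--     L2 = len(str2)
--     n2 = str2.count('1')
--
--     # 生成第一个字符串的所有可能组合
--     first_string_combinations = itertools.combinations(range(L1), n1)
--     first_strings = [''.join('1' if i in combination else '0' for i in range(L1)) for combination in
--                      first_string_combinations]
--
--     # 生成第二个字符串的所有可能组合
--     second_string_combinations = itertools.combinations(range(L2), n2)
--     second_strings = [''.join('1' if i in combination else '0' for i in range(L2)) for combination in
--                       second_string_combinations]
--
--     # 拼接所有可能的组合
--     concatenated_strings = [f + s for f in first_strings for s in second_strings]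
--
--     # 按照字典顺序排序
--     concatenated_strings.sort()
--
--     return concatenated_strings
-- ===== SOURCE B (Python) =====
-- def generate_binary_strings_from_input(str1, str2):
--     """Build each fixed-weight group bottom-up (dynamic programming over the
--     string length), producing it directly in ascending lexicographic order
--     ('0' branch before '1' branch), so the nested concatenation is already
--     sorted and no final sort is needed."""
--     def gen(L, k):
--         if k < 0 or k > L:
--             return []
--         if k == 0:
--             return ['0' * L]
--         cur = {0: ['']}  # cur[j]: ascending strings of current length with j ones
--         for l in range(1, L + 1):
--             lo = max(0, k - (L - l))
--             hi = min(l, k)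
--             nxt = {}
--             for j in range(lo, hi + 1):
--                 nxt[j] = ['0' + t for t in cur.get(j, [])] + \
--                          ['1' + t for t in cur.get(j - 1, [])]
--             cur = nxt
--         return cur[k]
--
--     first_strings = gen(len(str1), str1.count('1'))
--     second_strings = gen(len(str2), str2.count('1'))
--     return [f + s for f in first_strings for s in second_strings]
-- ===== Notes on version B (the rewrite author's own statement) =====
-- stated objective: faster
-- what changed: B builds each fixed-weight group bottom-up in ascending lexicographic order ('0' branch before '1' branch, with a direct all-zeros base case), so the nested concatenation comes out already sorted and both A's per-character combination-membership string building and the final sort are dropped.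
import Mathlib
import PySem

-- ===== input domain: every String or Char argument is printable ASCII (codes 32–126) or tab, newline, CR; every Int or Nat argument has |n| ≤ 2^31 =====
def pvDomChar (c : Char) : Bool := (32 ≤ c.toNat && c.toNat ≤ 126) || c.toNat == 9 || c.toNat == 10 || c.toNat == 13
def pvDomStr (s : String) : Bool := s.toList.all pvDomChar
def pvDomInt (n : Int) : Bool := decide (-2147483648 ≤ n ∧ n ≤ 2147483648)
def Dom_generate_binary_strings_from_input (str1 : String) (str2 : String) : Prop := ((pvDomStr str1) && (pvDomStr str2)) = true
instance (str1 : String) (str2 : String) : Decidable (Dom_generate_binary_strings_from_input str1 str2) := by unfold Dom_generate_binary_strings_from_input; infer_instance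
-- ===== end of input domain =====

-- B builds each fixed-weight group bottom-up in ascending lexicographic order, so the
-- concatenation comes out already sorted and the final sort is dropped (objective: faster,
-- measured).

-- ===== PORT A =====
-- Literal port of A: itertools.combinations → PySem.List.combinations, range → pyRange,
-- ''.join of one-char pieces → String.ofList of the mapped characters, then sorted().
def generate_binary_strings_from_input (str1 : String) (str2 : String) : List String :=
  let L1 := PySem.Str.len str1
  let n1 := PySem.Str.count str1 "1"
  let L2 := PySem.Str.len str2
  let n2 := PySem.Str.count str2 "1"
  let first_strings := (PySem.List.combinations (PySem.List.pyRange 0 L1 1) n1).map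
      (fun c => String.ofList ((PySem.List.pyRange 0 L1 1).map
        (fun i => if c.contains i then '1' else '0')))
  let second_strings := (PySem.List.combinations (PySem.List.pyRange 0 L2 1) n2).map
      (fun c => String.ofList ((PySem.List.pyRange 0 L2 1).map
        (fun i => if c.contains i then '1' else '0')))
  let concatenated := first_strings.flatMap (fun f => second_strings.map (fun s => f ++ s))
  PySem.List.sorted concatenated (fun x => x) false

-- ===== PORT B =====
-- B's gen(L, k): binary strings of length L with k ones in ascending lex order, built
-- bottom-up over the length (strings as their character lists; '0' + t is '0' :: t;
-- {0: ['']} is insert into empty; cur[k] is getD — the key k is always present there).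
def genIter (L : Nat) (k : Int) : List (List Char) :=
  if k < 0 ∨ (L : Int) < k then []
  else if k = 0 then [List.replicate L '0']  -- '0' * L
  else
    let cur0 : PySem.Dict Int (List (List Char)) := (PySem.Dict.empty).insert 0 [[]]
    let cur := (PySem.List.pyRange 1 ((L : Int) + 1) 1).foldl
      (fun cur l =>
        let lo := max 0 (k - ((L : Int) - l))
        let hi := min l k
        (PySem.List.pyRange lo (hi + 1) 1).foldl
          (fun nxt j => nxt.insert j
            ((cur.getD j []).map (fun t => '0' :: t) ++ (cur.getD (j - 1) []).map (fun t => '1' :: t)))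
          PySem.Dict.empty)
      cur0
    cur.getD k []


def generate_binary_strings_from_input_alt (str1 : String) (str2 : String) : List String :=
  -- len(str) is nonnegative, so .toNat is exact here
  let first_strings := genIter (PySem.Str.len str1).toNat (PySem.Str.count str1 "1")
  let second_strings := genIter (PySem.Str.len str2).toNat (PySem.Str.count str2 "1")
  first_strings.flatMap (fun f => second_strings.map (fun s => String.ofList (f ++ s)))

-- ===== PRECONDITION & SPEC =====
def Spec_generate_binary_strings_from_input (str1 : String) (str2 : String) (out : List String) : Prop := out = generate_binary_strings_from_input_alt str1 str2
instance (str1 : String) (str2 : String) (out : List String) : Decidable (Spec_generate_binary_strings_from_input str1 str2 out) := by unfold Spec_generate_binary_strings_from_input; infer_instance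

-- ===== CLAIM (what is proved, stated in full; the proofs are below) =====
def Claim_equal_generate_binary_strings_from_input : Prop := ∀ (str1 : String) (str2 : String), Dom_generate_binary_strings_from_input str1 str2 → Spec_generate_binary_strings_from_input str1 str2 (generate_binary_strings_from_input str1 str2)

-- ===== LEMMAS AND PROOFS =====

-- proof-side recursive characterisation of B's bottom-up gen
def genB : Nat → Int → List (List Char)
  | 0, k => if k < 0 ∨ (0 : Int) < k then [] else [[]]
  | (L + 1), k =>
    if k < 0 ∨ ((L : Int) + 1) < k then []
    else (genB L k).map (fun t => '0' :: t) ++ (genB L (k - 1)).map (fun t => '1' :: t)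


lemma genB_nil_of_lt (L : Nat) (k : Int) (h : k < 0 ∨ (L : Int) < k) : genB L k = [] := by
  cases L with
  | zero => simp only [genB]; rw [if_pos (by exact_mod_cast h)]
  | succ L => simp only [genB]; rw [if_pos (by push_cast at h ⊢; omega)]

lemma genB_zero (L : Nat) : genB L 0 = [List.replicate L '0'] := by
  induction L with
  | zero => simp [genB]
  | succ L ih =>
    simp only [genB, if_neg (by omega : ¬((0:Int) < 0 ∨ (L:Int) + 1 < 0))]
    rw [ih, genB_nil_of_lt _ _ (by omega)]
    simp [List.replicate_succ]

lemma getD_foldl_insert_range (f : Int → List (List Char)) :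
    ∀ (n : Nat) (lo hi : Int), (hi - lo).toNat = n →
    ∀ (d0 : PySem.Dict Int (List (List Char))) (j : Int),
      ((PySem.List.pyRange lo hi 1).foldl (fun acc i => acc.insert i (f i)) d0).getD j []
      = if lo ≤ j ∧ j < hi then f j else d0.getD j [] := by
  intro n
  induction n with
  | zero =>
    intro lo hi h d0 j
    rw [PySem.List.pyRange_one_eq_nil (by omega), List.foldl_nil, if_neg (by omega)]
  | succ n ih =>
    intro lo hi h d0 j
    have hlt : lo < hi := by omega
    rw [PySem.List.pyRange_one_cons hlt, List.foldl_cons, ih (lo+1) hi (by omega)]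
    by_cases hj : lo + 1 ≤ j ∧ j < hi
    · rw [if_pos hj, if_pos (by omega)]
    · rw [if_neg hj, PySem.Dict.getD_insert]
      by_cases hj2 : j = lo
      · subst hj2; rw [if_pos rfl, if_pos (by omega)]
      · rw [if_neg hj2, if_neg (by omega)]

lemma iter_inv (L : Nat) (k : Int) (hk0 : 0 ≤ k) (hkL : k ≤ (L : Int)) :
    ∀ (l : Nat), l ≤ L → ∀ (j : Int),
      (((PySem.List.pyRange 1 ((l : Int) + 1) 1).foldl
        (fun cur l =>
          (PySem.List.pyRange (max 0 (k - ((L : Int) - l))) ((min l k) + 1) 1).foldl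
            (fun nxt j => nxt.insert j
              ((cur.getD j []).map (fun t => '0' :: t) ++ (cur.getD (j - 1) []).map (fun t => '1' :: t)))
            PySem.Dict.empty)
        ((PySem.Dict.empty).insert 0 [[]])).getD j [])
      = if max 0 (k - ((L : Int) - (l : Int))) ≤ j ∧ j ≤ min (l : Int) k then genB l j else [] := by
  intro l
  induction l with
  | zero =>
    intro _ j
    rw [PySem.List.pyRange_one_eq_nil (by omega), List.foldl_nil, PySem.Dict.getD_insert]
    by_cases hj : j = 0
    · subst hj
      rw [if_pos rfl, if_pos (by constructor <;> [omega; omega])]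
      simp [genB]
    · rw [if_neg hj, PySem.Dict.getD_empty, if_neg (by omega)]
  | succ l ih =>
    intro hl j
    have h1 : (1 : Int) ≤ (l : Int) + 1 := by omega
    have hsplit : PySem.List.pyRange 1 (((l + 1 : Nat) : Int) + 1) 1
        = PySem.List.pyRange 1 ((l : Int) + 1) 1 ++ [(l : Int) + 1] := by
      push_cast
      exact PySem.List.pyRange_one_succ_right h1
    rw [hsplit, List.foldl_append, List.foldl_cons, List.foldl_nil]
    rw [getD_foldl_insert_range _ ((min ((l:Int)+1) k + 1) - (max 0 (k - ((L : Int) - ((l:Int)+1))))).toNat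
      _ _ rfl _ j]
    by_cases hj : max 0 (k - ((L : Int) - ((l:Int)+1))) ≤ j ∧ j < min ((l:Int)+1) k + 1
    · rw [if_pos hj, if_pos (by push_cast; omega)]
      rw [ih (by omega) j, ih (by omega) (j - 1)]
      -- genB (l+1) j unfolds into the two branches
      have hguard : ¬(j < 0 ∨ ((l : Int) + 1) < j) := by omega
      show _ = genB (l + 1) j
      simp only [genB]
      rw [if_neg hguard]
      congr 1
      · -- '0' branch: cur.getD j
        by_cases hb : max 0 (k - ((L : Int) - (l : Int))) ≤ j ∧ j ≤ min (l : Int) k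
        · rw [if_pos hb]
        · rw [if_neg hb, genB_nil_of_lt l j (by omega), List.map_nil]
      · -- '1' branch: cur.getD (j-1)
        by_cases hb : max 0 (k - ((L : Int) - (l : Int))) ≤ j - 1 ∧ j - 1 ≤ min (l : Int) k
        · rw [if_pos hb]
        · rw [if_neg hb, genB_nil_of_lt l (j - 1) (by omega), List.map_nil]
    · rw [if_neg hj, PySem.Dict.getD_empty, if_neg (by push_cast; omega)]

lemma genIter_eq_genB (L : Nat) (k : Int) : genIter L k = genB L k := by
  unfold genIter
  by_cases h : k < 0 ∨ (L : Int) < k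
  · rw [if_pos h]
    exact (genB_nil_of_lt L k h).symm
  · rw [if_neg h]
    push Not at h
    by_cases hk : k = 0
    · subst hk
      rw [if_pos rfl]
      exact (genB_zero L).symm
    · rw [if_neg hk]
      simp only
      have := iter_inv L k h.1 h.2 L le_rfl k
      rw [this, if_pos (by omega)]




lemma genB_length (L : Nat) (k : Int) : ∀ cs ∈ genB L k, cs.length = L := by
  induction L generalizing k with
  | zero => intro cs h; simp only [genB] at h; split at h <;> simp_all
  | succ L ih =>
    intro cs h
    simp only [genB] at h
    split at h
    · simp at h
    · simp only [List.mem_append, List.mem_map] at h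
      rcases h with ⟨t, ht, rfl⟩ | ⟨t, ht, rfl⟩ <;> simp [ih _ _ ht]

lemma lex_append_left (f : List Char) {s t : List Char} (h : s < t) : f ++ s < f ++ t := by
  induction f with
  | nil => exact h
  | cons c f ih => exact List.Lex.cons ih

lemma lex_append_of_lt_of_length_eq :
    ∀ (a b : List Char), a < b → a.length = b.length → ∀ (s t : List Char), a ++ s < b ++ t := by
  intro a
  induction a with
  | nil =>
    intro b h hl
    have : b = [] := (List.length_eq_zero_iff).mp hl.symm
    subst this
    simp at h
  | cons x a ih =>
    intro b h hl s t
    cases b with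
    | nil => simp at hl
    | cons y b =>
      cases h with
      | rel hr => exact List.Lex.rel hr
      | cons h' => exact List.Lex.cons (ih b h' (by simpa using hl) s t)

lemma genB_pairwise (L : Nat) (k : Int) : (genB L k).Pairwise (· < ·) := by
  induction L generalizing k with
  | zero => simp only [genB]; split <;> simp
  | succ L ih =>
    simp only [genB]
    split
    · simp
    · apply List.pairwise_append.mpr
      refine ⟨(List.pairwise_map).mpr ?_, (List.pairwise_map).mpr ?_, ?_⟩
      · exact (ih k).imp (fun h => List.Lex.cons h)
      · exact (ih (k-1)).imp (fun h => List.Lex.cons h)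
      · intro x hx y hy
        simp only [List.mem_map] at hx hy
        obtain ⟨u, _, rfl⟩ := hx
        obtain ⟨v, _, rfl⟩ := hy
        exact List.Lex.rel (by decide)

lemma flat_pairwise (fs ss : List (List Char)) (Lf : Nat)
    (hf : fs.Pairwise (· < ·)) (hlen : ∀ f ∈ fs, f.length = Lf) (hs : ss.Pairwise (· < ·)) :
    (fs.flatMap (fun f => ss.map (fun s => f ++ s))).Pairwise (· < ·) := by
  induction fs with
  | nil => simp
  | cons f fs ih =>
    simp only [List.flatMap_cons]
    apply List.pairwise_append.mpr
    refine ⟨(List.pairwise_map).mpr (hs.imp (fun h => lex_append_left f h)), ?_, ?_⟩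
    · exact ih hf.of_cons (fun g hg => hlen g (List.mem_cons_of_mem _ hg))
    · intro x hx y hy
      simp only [List.mem_map] at hx
      obtain ⟨s, _, rfl⟩ := hx
      simp only [List.mem_flatMap, List.mem_map] at hy
      obtain ⟨g, hg, s', _, rfl⟩ := hy
      have hfg : f < g := (List.pairwise_cons.mp hf).1 g hg
      exact lex_append_of_lt_of_length_eq f g hfg
        (by rw [hlen f List.mem_cons_self, hlen g (List.mem_cons_of_mem _ hg)]) s s'

lemma flatMap_perm_pointwise {α β : Type} (l : List α) (g g' : α → List β)
    (h : ∀ a ∈ l, (g a).Perm (g' a)) : (l.flatMap g).Perm (l.flatMap g') := by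
  induction l with
  | nil => simp
  | cons a l ih =>
    simp only [List.flatMap_cons]
    exact (h a List.mem_cons_self).append (ih (fun b hb => h b (List.mem_cons_of_mem _ hb)))

def combStrings (L : Nat) (n : Nat) : List (List Char) :=
  (PySem.List.combinations (PySem.List.pyRange 0 (L : Int) 1) n).map
    (fun c => (PySem.List.pyRange 0 (L : Int) 1).map (fun i => if c.contains i then '1' else '0'))

lemma pyRange_zero_succ (L : Nat) :
    PySem.List.pyRange 0 ((L : Int) + 1) 1 = 0 :: (PySem.List.pyRange 0 (L : Int) 1).map (· + 1) := by
  rw [PySem.List.pyRange_one_cons (by omega)]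
  congr 1
  apply List.ext_getElem
  · simp [PySem.List.length_pyRange_one]
  · intro k h1 h2
    simp [PySem.List.getElem_pyRange_one]
    omega

lemma combStrings_eq (L : Nat) : ∀ n : Nat, combStrings L n = (genB L (n : Int)).reverse := by
  induction L with
  | zero =>
    intro n
    cases n with
    | zero => simp [combStrings, genB, PySem.List.pyRange_one_eq_nil, PySem.List.combinations_zero]
    | succ n =>
      simp [combStrings, genB, PySem.List.pyRange_one_eq_nil, PySem.List.combinations_nil_succ]
  | succ L ih =>
    intro n
    have hcast : ((L + 1 : Nat) : Int) = (L : Int) + 1 := by push_cast; ring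
    cases n with
    | zero =>
      simp only [combStrings, PySem.List.combinations_zero, List.map_cons, List.map_nil,
        Nat.cast_zero, genB_zero, List.reverse_cons, List.reverse_nil, List.nil_append]
      congr 1
      have : ∀ i ∈ PySem.List.pyRange 0 ((L+1 : Nat) : Int) 1,
          (if ([] : List Int).contains i then '1' else '0') = '0' := by simp
      rw [List.map_congr_left this, List.map_const']
      simp [PySem.List.length_pyRange_one]
    | succ n =>
      -- unfold the range as 0 :: shifted range
      rw [combStrings, hcast, pyRange_zero_succ, PySem.List.combinations_cons_succ,
        PySem.List.combinations_map, PySem.List.combinations_map, List.map_append,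
        List.map_map, List.map_map, List.map_map]
      have hmem : ∀ m : Nat, ∀ c ∈ PySem.List.combinations (PySem.List.pyRange 0 (L : Int) 1) m,
          ∀ a ∈ c, 0 ≤ a := by
        intro m c hc a ha
        have hsub := PySem.List.sublist_of_mem_combinations hc
        exact (PySem.List.mem_pyRange_one.mp (hsub.subset ha)).1
      trans ((PySem.List.combinations (PySem.List.pyRange 0 (L : Int) 1) n).map
          (fun c => '1' :: (PySem.List.pyRange 0 (L : Int) 1).map (fun i => if c.contains i then '1' else '0')) ++
        (PySem.List.combinations (PySem.List.pyRange 0 (L : Int) 1) (n+1)).map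
          (fun c => '0' :: (PySem.List.pyRange 0 (L : Int) 1).map (fun i => if c.contains i then '1' else '0')))
      · refine congrArg₂ (· ++ ·) (List.map_congr_left ?_) (List.map_congr_left ?_)
        · intro c hc
          simp only [Function.comp_apply, List.map_cons, List.map_map]
          refine congrArg₂ _ (by simp) ?_
          apply List.map_congr_left
          intro i hi
          have hi0 : 0 ≤ i := (PySem.List.mem_pyRange_one.mp hi).1
          simp only [Function.comp_apply]
          have hco : ((0 :: c.map (· + 1)).contains (i + 1)) = (c.contains i) := by
            rw [Bool.eq_iff_iff]
            simp only [List.contains_iff_mem, List.mem_cons, List.mem_map]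
            constructor
            · rintro (h2 | ⟨a, ha, h2⟩)
              · omega
              · have : a = i := by omega
                subst this; exact ha
            · intro h2; exact Or.inr ⟨i, h2, rfl⟩
          rw [hco]
        · intro c hc
          simp only [Function.comp_apply, List.map_cons, List.map_map]
          refine congrArg₂ _ ?_ ?_
          · have : ((c.map (· + 1)).contains (0 : Int)) = false := by
              rw [Bool.eq_false_iff]
              simp only [ne_eq, List.contains_iff_mem, List.mem_map, not_exists, not_and]
              intro a ha
              have := hmem (n+1) c hc a ha
              omega
            rw [this]
            simp
          · apply List.map_congr_left
            intro i hi
            have hi0 : 0 ≤ i := (PySem.List.mem_pyRange_one.mp hi).1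
            simp only [Function.comp_apply]
            have hco : ((c.map (· + 1)).contains (i + 1)) = (c.contains i) := by
              rw [Bool.eq_iff_iff]
              simp only [List.contains_iff_mem, List.mem_map]
              constructor
              · rintro ⟨a, ha, h2⟩
                have : a = i := by omega
                subst this; exact ha
              · intro h2; exact ⟨i, h2, rfl⟩
            rw [hco]
      · have e1 : (PySem.List.combinations (PySem.List.pyRange 0 (L : Int) 1) n).map
            (fun c => '1' :: (PySem.List.pyRange 0 (L : Int) 1).map (fun i => if c.contains i then '1' else '0'))
            = (combStrings L n).map (fun t => '1' :: t) := by
          rw [combStrings, List.map_map]; rfl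
        have e2 : (PySem.List.combinations (PySem.List.pyRange 0 (L : Int) 1) (n+1)).map
            (fun c => '0' :: (PySem.List.pyRange 0 (L : Int) 1).map (fun i => if c.contains i then '1' else '0'))
            = (combStrings L (n+1)).map (fun t => '0' :: t) := by
          rw [combStrings, List.map_map]; rfl
        rw [e1, e2, ih n, ih (n+1)]
        by_cases hL : (L : Int) < n
        · rw [genB_nil_of_lt L n (Or.inr hL), genB_nil_of_lt L ((n:Nat)+1 : Nat) (by push_cast; omega),
            genB_nil_of_lt (L+1) (((n:Nat)+1 : Nat) : Int) (by push_cast; omega)]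
          simp
        · show _ = (genB (L+1) ((n+1 : Nat) : Int)).reverse
          simp only [genB]
          rw [if_neg (by push_cast at hL ⊢; omega)]
          rw [List.reverse_append, List.map_reverse, List.map_reverse]
          push_cast
          ring_nf

lemma charConc_perm (L1 n1 L2 n2 : Nat) :
    ((combStrings L1 n1).flatMap (fun f => (combStrings L2 n2).map (fun s => f ++ s))).Perm
      ((genB L1 (n1 : Int)).flatMap (fun f => (genB L2 (n2 : Int)).map (fun s => f ++ s))) := by
  rw [combStrings_eq, combStrings_eq]
  refine List.Perm.trans (List.Perm.flatMap_right _ (List.reverse_perm _)) ?_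
  exact flatMap_perm_pointwise _ _ _ (fun f _ => (List.reverse_perm _).map _)

lemma flat_ofList (fs ss : List (List Char)) :
    (fs.map String.ofList).flatMap (fun f => (ss.map String.ofList).map (fun s => f ++ s))
    = (fs.flatMap (fun f => ss.map (fun s => f ++ s))).map String.ofList := by
  rw [List.map_flatMap, List.flatMap_map]
  congr 1
  funext f
  simp only [List.map_map]
  apply List.map_congr_left
  intro s _
  simp [String.ofList_append]

lemma main_eq (L1 n1 L2 n2 : Nat) :
    PySem.List.sorted
      (((PySem.List.combinations (PySem.List.pyRange 0 (L1 : Int) 1) n1).map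
          (fun c => String.ofList ((PySem.List.pyRange 0 (L1 : Int) 1).map
            (fun i => if c.contains i then '1' else '0')))).flatMap
        (fun f => ((PySem.List.combinations (PySem.List.pyRange 0 (L2 : Int) 1) n2).map
          (fun c => String.ofList ((PySem.List.pyRange 0 (L2 : Int) 1).map
            (fun i => if c.contains i then '1' else '0')))).map (fun s => f ++ s)))
      (fun x => x) false
    = (genB L1 (n1 : Int)).flatMap (fun f => (genB L2 (n2 : Int)).map (fun s => String.ofList (f ++ s))) := by
  have e1 : ∀ (L n : Nat), (PySem.List.combinations (PySem.List.pyRange 0 (L : Int) 1) n).map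
      (fun c => String.ofList ((PySem.List.pyRange 0 (L : Int) 1).map
        (fun i => if c.contains i then '1' else '0')))
      = (combStrings L n).map String.ofList := by
    intro L n
    rw [combStrings, List.map_map]
    rfl
  have eB : (genB L1 (n1 : Int)).flatMap (fun f => (genB L2 (n2 : Int)).map (fun s => String.ofList (f ++ s)))
      = ((genB L1 (n1 : Int)).flatMap (fun f => (genB L2 (n2 : Int)).map (fun s => f ++ s))).map String.ofList := by
    rw [List.map_flatMap]
    congr 1
    funext f
    simp [List.map_map]
  rw [e1, e1, flat_ofList, eB]
  apply PySem.List.sorted_eq_of_perm_of_pairwise_lt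
  · exact ((charConc_perm L1 n1 L2 n2).symm).map _
  · refine List.Pairwise.map _ (fun a b h => ?_)
      (flat_pairwise (genB L1 (n1 : Int)) (genB L2 (n2 : Int)) L1
        (genB_pairwise L1 (n1 : Int)) (genB_length L1 (n1 : Int)) (genB_pairwise L2 (n2 : Int)))
    rw [String.lt_iff_toList_lt, String.toList_ofList, String.toList_ofList]
    exact h

theorem main_spec (str1 str2 : String) :
    generate_binary_strings_from_input str1 str2 = generate_binary_strings_from_input_alt str1 str2 := by
  simp only [generate_binary_strings_from_input, generate_binary_strings_from_input_alt,
    PySem.Str.len_eq, Int.toNat_natCast]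
  rw [genIter_eq_genB, genIter_eq_genB]
  exact main_eq str1.toList.length (PySem.Str.count str1 "1")
    str2.toList.length (PySem.Str.count str2 "1")

-- ===== VERDICT (by name: the statement is the Claim_ definition above) =====
theorem generate_binary_strings_from_input_spec : Claim_equal_generate_binary_strings_from_input := by
  intro str1 str2 _
  exact (main_spec str1 str2).symm ▸ rfl
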